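-- pv_equiv track=rewrite | github.com/wxyhgk/retain-pdf | scripts/classification/response_parser.py | expand_page_ranges
-- ===== SOURCE A (Python) =====
-- def expand_page_ranges(spec: str, valid_orders: set[int]) -> set[int]:
--     result: set[int] = set()
--     for raw_part in spec.split(","):
--         part = raw_part.strip()
--         if not part:
--             continue
--         if "~" in part:
--             left, right = [chunk.strip() for chunk in part.split("~", 1)]
--             if not left.isdigit() or not right.isdigit():
--                 continue
--             start = int(left)
--             end = int(right)
--             if start > end:
--                 start, end = end, start
--             for order in range(start, end + 1):
--                 if order in valid_orders:
--                     result.add(order)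
--             continue
--         if part.isdigit():
--             order = int(part)
--             if order in valid_orders:
--                 result.add(order)
--     return result
-- ===== SOURCE B (Python) =====
-- def _parse_interval(part: str):
--     """Parse one stripped spec part into an inclusive (lo, hi) interval, or None."""
--     if "~" in part:
--         left, right = [c.strip() for c in part.split("~", 1)]
--         if left.isdigit() and right.isdigit():
--             a, b = int(left), int(right)
--             return (min(a, b), max(a, b))
--         return None
--     if part.isdigit():
--         n = int(part)
--         return (n, n)
--     return None
--
--
-- def expand_page_ranges(spec: str, valid_orders: set[int]) -> set[int]:
--     # Two staged passes: parse the spec into a list of inclusive intervals,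
--     # then collect the sorted valid orders falling into each interval
--     # (never iterating the integers of a range).
--     intervals = [iv for iv in (_parse_interval(p.strip()) for p in spec.split(",")) if iv is not None]
--     ordered = sorted(valid_orders)
--     result: set[int] = set()
--     for lo, hi in intervals:
--         result.update(v for v in ordered if lo <= v <= hi)
--     return result
-- ===== Notes on version B (the rewrite author's own statement) =====
-- stated objective: alternative
-- what changed: B is two staged passes: it first parses the spec into a list of inclusive intervals (singletons become [n,n]) with a separate helper, then sorts the valid orders once and collects those lying in each interval, instead of A's single loop that scans every integer of each range and tests set membership.
import Mathlib
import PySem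

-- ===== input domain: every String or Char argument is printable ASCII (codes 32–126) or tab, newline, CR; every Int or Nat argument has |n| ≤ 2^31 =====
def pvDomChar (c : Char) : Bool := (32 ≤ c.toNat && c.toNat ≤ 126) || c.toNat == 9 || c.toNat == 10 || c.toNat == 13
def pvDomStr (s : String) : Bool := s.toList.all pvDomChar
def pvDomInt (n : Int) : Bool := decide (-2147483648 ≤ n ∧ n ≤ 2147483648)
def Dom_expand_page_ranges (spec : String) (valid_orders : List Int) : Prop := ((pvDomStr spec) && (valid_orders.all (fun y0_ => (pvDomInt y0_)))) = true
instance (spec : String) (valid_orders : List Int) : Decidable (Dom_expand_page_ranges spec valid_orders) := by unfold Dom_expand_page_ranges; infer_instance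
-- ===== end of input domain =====

-- B replaces A's single loop (scan every integer of each range, test membership)
-- by two staged passes: parse the spec into a list of inclusive intervals, then
-- collect the sorted valid orders falling into each interval (alternative algorithm,
-- same return value).

-- ===== PORT A =====
def expand_page_ranges (spec : String) (valid_orders : List Int) : List Int :=
  ((PySem.Str.split? spec ",").getD []).foldl (fun result raw_part =>
    let part := PySem.Str.strip raw_part
    if part = "" then result
    else if PySem.Str.isIn "~" part then
      -- part.split("~", 1) always yields exactly two chunks here since "~" ∈ part
      let chunks := ((PySem.Str.splitMax? part "~" 1).getD []).map PySem.Str.strip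
      let left := chunks.getD 0 ""
      let right := chunks.getD 1 ""
      if !(PySem.Str.strIsdigit left) || !(PySem.Str.strIsdigit right) then result
      else
        -- int(left)/int(right) cannot raise: both are nonempty digit strings
        let start := (PySem.Int.ofStr? left).getD 0
        let stop := (PySem.Int.ofStr? right).getD 0
        let se := if start > stop then (stop, start) else (start, stop)
        (PySem.List.pyRange se.1 (se.2 + 1)).foldl
          (fun r o => if valid_orders.contains o then PySem.Set.add r o else r) result
    else if PySem.Str.strIsdigit part then
      let order := (PySem.Int.ofStr? part).getD 0
      if valid_orders.contains order then PySem.Set.add result order else result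
    else result) []

-- ===== PORT B =====
-- _parse_interval: one stripped part -> inclusive interval or None
def parseInterval (part : String) : Option (Int × Int) :=
  if PySem.Str.isIn "~" part then
    let chunks := ((PySem.Str.splitMax? part "~" 1).getD []).map PySem.Str.strip
    let left := chunks.getD 0 ""
    let right := chunks.getD 1 ""
    if PySem.Str.strIsdigit left && PySem.Str.strIsdigit right then
      let a := (PySem.Int.ofStr? left).getD 0
      let b := (PySem.Int.ofStr? right).getD 0
      some (min a b, max a b)
    else none
  else if PySem.Str.strIsdigit part then
    some ((PySem.Int.ofStr? part).getD 0, (PySem.Int.ofStr? part).getD 0)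
  else none

def expand_page_ranges_alt (spec : String) (valid_orders : List Int) : List Int :=
  -- pass 1: intervals = [iv for iv in (_parse_interval(p.strip()) for p in spec.split(",")) if iv is not None]
  let intervals := ((PySem.Str.split? spec ",").getD []).filterMap
    (fun p => parseInterval (PySem.Str.strip p))
  -- ordered = sorted(valid_orders)  (valid_orders is a Python set: distinct elements)
  let ordered := PySem.List.sorted (PySem.Set.ofList valid_orders) (fun x => x)
  -- pass 2: for lo, hi in intervals: result.update(v for v in ordered if lo <= v <= hi)
  intervals.foldl (fun result iv =>
    ordered.foldl (fun r v => if iv.1 ≤ v && v ≤ iv.2 then PySem.Set.add r v else r) result) []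

-- ===== PRECONDITION & SPEC =====
def Spec_expand_page_ranges (spec : String) (valid_orders : List Int) (out : List Int) : Prop := out = expand_page_ranges_alt spec valid_orders
instance (spec : String) (valid_orders : List Int) (out : List Int) : Decidable (Spec_expand_page_ranges spec valid_orders out) := by unfold Spec_expand_page_ranges; infer_instance

-- ===== CLAIM =====
def Claim_equal_expand_page_ranges : Prop := ∀ (spec : String) (valid_orders : List Int), Dom_expand_page_ranges spec valid_orders → Spec_expand_page_ranges spec valid_orders (expand_page_ranges spec valid_orders)

-- ===== LEMMAS AND PROOFS =====

-- conditional Set.add fold = fold of Set.add over the filtered list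
theorem foldl_add_if_eq_filter (p : Int → Bool) (l : List Int) (r : PySem.Set Int) :
    l.foldl (fun r o => if p o then PySem.Set.add r o else r) r
      = (l.filter p).foldl PySem.Set.add r := by
  induction l generalizing r with
  | nil => rfl
  | cons x xs ih =>
    by_cases h : p x <;> simp [h, ih]

-- two strictly increasing integer lists with the same members are equal
theorem eq_of_pairwise_lt_of_mem_iff (l1 l2 : List Int)
    (h1 : l1.Pairwise (· < ·)) (h2 : l2.Pairwise (· < ·))
    (hm : ∀ x, x ∈ l1 ↔ x ∈ l2) : l1 = l2 := by
  apply List.Perm.eq_of_pairwise (fun a b _ _ hab hba => le_antisymm hab hba)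
    (h1.imp le_of_lt) (h2.imp le_of_lt)
  exact List.perm_of_nodup_nodup_toFinset_eq (h1.imp ne_of_lt) (h2.imp ne_of_lt)
    (Finset.ext fun x => by simpa [List.mem_toFinset] using hm x)

-- the per-interval element sequences coincide
theorem range_filter_eq_sorted_filter (vs : List Int) (s e : Int) :
    (PySem.List.pyRange s (e + 1)).filter (fun o => vs.contains o)
      = (PySem.List.sorted (PySem.Set.ofList vs) (fun x => x)).filter
          (fun v => s <= v && v <= e) := by
  apply eq_of_pairwise_lt_of_mem_iff
  · exact List.Pairwise.filter _ (PySem.List.pairwise_lt_pyRange_one s (e + 1))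
  · exact List.Pairwise.filter _ (PySem.List.sorted_ofList_pairwise_lt vs)
  · intro x
    simp only [List.mem_filter, PySem.List.mem_pyRange_one, PySem.List.mem_sorted,
      PySem.Set.mem_ofList, decide_eq_true_eq, Bool.and_eq_true, Int.lt_add_one_iff,
      List.contains_eq_mem]
    tauto

-- A's range scan equals B's filter over the sorted valid orders
theorem fold_eq (vs : List Int) (s e : Int) (r : PySem.Set Int) :
    (PySem.List.pyRange s (e + 1)).foldl
        (fun r o => if vs.contains o then PySem.Set.add r o else r) r
      = (PySem.List.sorted (PySem.Set.ofList vs) (fun x => x)).foldl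
        (fun r v => if s <= v && v <= e then PySem.Set.add r v else r) r := by
  rw [foldl_add_if_eq_filter, foldl_add_if_eq_filter, range_filter_eq_sorted_filter]

-- folding over a filterMap = folding over the source with an option-match step
theorem foldl_filterMap_option {α β γ : Type} (g : α → Option β) (f : γ → β → γ)
    (l : List α) (init : γ) :
    (l.filterMap g).foldl f init
      = l.foldl (fun acc x => (g x).elim acc (f acc)) init := by
  induction l generalizing init with
  | nil => rfl
  | cons x xs ih =>
    cases h : g x <;> simp [h, ih]

-- A's loop body for one stripped part, expressed through B's parser
theorem step_eq (vs : List Int) (r : PySem.Set Int) (part : String) :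
    (if part = "" then r
     else if PySem.Str.isIn "~" part then
       let chunks := ((PySem.Str.splitMax? part "~" 1).getD []).map PySem.Str.strip
       let left := chunks.getD 0 ""
       let right := chunks.getD 1 ""
       if !(PySem.Str.strIsdigit left) || !(PySem.Str.strIsdigit right) then r
       else
         let start := (PySem.Int.ofStr? left).getD 0
         let stop := (PySem.Int.ofStr? right).getD 0
         let se := if start > stop then (stop, start) else (start, stop)
         (PySem.List.pyRange se.1 (se.2 + 1)).foldl
           (fun r o => if vs.contains o then PySem.Set.add r o else r) r
     else if PySem.Str.strIsdigit part then
       let order := (PySem.Int.ofStr? part).getD 0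
       if vs.contains order then PySem.Set.add r order else r
     else r)
    = (parseInterval part).elim r (fun iv =>
        (PySem.List.sorted (PySem.Set.ofList vs) (fun x => x)).foldl
          (fun result v => if iv.1 ≤ v && v ≤ iv.2 then PySem.Set.add result v else result) r) := by
  by_cases h0 : part = ""
  · subst h0
    have hp : parseInterval "" = none := by rfl
    rw [hp, if_pos rfl]
    rfl
  · rw [if_neg h0]
    unfold parseInterval
    by_cases h1 : PySem.Str.isIn "~" part
    · simp only [if_pos h1]
      generalize (((PySem.Str.splitMax? part "~" 1).getD []).map PySem.Str.strip).getD 0 "" = left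
      generalize (((PySem.Str.splitMax? part "~" 1).getD []).map PySem.Str.strip).getD 1 "" = right
      generalize (PySem.Int.ofStr? left).getD 0 = a
      generalize (PySem.Int.ofStr? right).getD 0 = b
      by_cases h2 : PySem.Str.strIsdigit left && PySem.Str.strIsdigit right
      · have h2' : (!(PySem.Str.strIsdigit left) || !(PySem.Str.strIsdigit right)) = false := by
          simp_all
        simp only [if_pos h2, h2', Bool.false_eq_true, if_false]
        have hse : (if a > b then (b, a) else (a, b)) = (min a b, max a b) := by
          split_ifs with h
          · simp [min_def, max_def]; omega
          · simp [min_def, max_def]; omega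
        rw [hse]
        exact fold_eq vs (min a b) (max a b) r
      · have h2' : (!(PySem.Str.strIsdigit left) || !(PySem.Str.strIsdigit right)) = true := by
          cases hL : PySem.Str.strIsdigit left <;> cases hR : PySem.Str.strIsdigit right <;>
            simp_all
        simp only [if_neg h2, h2', if_true]
        rfl
    · simp only [if_neg h1]
      by_cases h3 : PySem.Str.strIsdigit part
      · simp only [if_pos h3]
        generalize (PySem.Int.ofStr? part).getD 0 = n
        have := fold_eq vs n n r
        rw [PySem.List.pyRange_one_singleton] at this
        simp only [List.foldl_cons, List.foldl_nil] at this
        rw [this]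
        rfl
      · simp only [if_neg h3]
        rfl

-- ===== VERDICT =====
set_option maxHeartbeats 1000000 in
theorem expand_page_ranges_spec : Claim_equal_expand_page_ranges := by
  intro spec vs _
  unfold Spec_expand_page_ranges expand_page_ranges expand_page_ranges_alt
  rw [foldl_filterMap_option]
  refine congrFun (congrArg (fun f => List.foldl f ([] : PySem.Set Int)) ?_) _
  funext r raw
  exact step_eq vs r (PySem.Str.strip raw)
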